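-- pv_equiv track=rewrite | github.com/sharronesofer/visual_dm | backend/infrastructure/systems/religion/config_loader.py | validate_religion_config
-- ===== SOURCE A (Python) =====
-- from typing import Dict, Any, List, Optional, Union
--
-- def validate_religion_config(configs: Dict[str, Dict[str, Any]]) -> Dict[str, List[str]]:
--     """
--     Validate the loaded configuration for completeness and consistency.
--
--     Args:
--         configs: Dictionary of loaded configurations
--
--     Returns:
--         Dictionary of validation errors by config file
--     """
--     errors = {
--         "religion_config": [],
--         "narrative_templates": [],
--         "influence_rules": [],
--         "practices_templates": []
--     }
--
--     religion_config = configs.get("religion_config", {})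
--     narrative_templates = configs.get("narrative_templates", {})
--     influence_rules = configs.get("influence_rules", {})
--     practices_templates = configs.get("practices_templates", {})
--
--     # Validate religion_config
--     if not religion_config:
--         errors["religion_config"].append("Configuration file not loaded")
--     else:
--         if "religion_types" not in religion_config:
--             errors["religion_config"].append("Missing religion_types section")
--         if "devotion_modifiers" not in religion_config:
--             errors["religion_config"].append("Missing devotion_modifiers section")
--         if "compatibility_factors" not in religion_config:
--             errors["religion_config"].append("Missing compatibility_factors section")
--
--     # Validate narrative_templates
--     if not narrative_templates:
--         errors["narrative_templates"].append("Configuration file not loaded")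
--     else:
--         required_sections = ["conversion_templates", "devotion_change_narratives", "religious_event_templates"]
--         for section in required_sections:
--             if section not in narrative_templates:
--                 errors["narrative_templates"].append(f"Missing {section} section")
--
--     # Validate influence_rules
--     if not influence_rules:
--         errors["influence_rules"].append("Configuration file not loaded")
--     else:
--         required_sections = ["spread_mechanics", "influence_calculations", "regional_modifiers"]
--         for section in required_sections:
--             if section not in influence_rules:
--                 errors["influence_rules"].append(f"Missing {section} section")
--
--     # Validate practices_templates
--     if not practices_templates:
--         errors["practices_templates"].append("Configuration file not loaded")
--     else:
--         required_sections = ["practice_templates", "festival_templates"]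
--         for section in required_sections:
--             if section not in practices_templates:
--                 errors["practices_templates"].append(f"Missing {section} section")
--
--     return {k: v for k, v in errors.items() if v}  # Only return sections with errors
-- ===== SOURCE B (Python) =====
-- # One flat pass over (config_key, section) requirement pairs; errors are inserted
-- # on first failure (dict insertion order), so no final filtering pass is needed.
-- REQUIRED = [
--     ("religion_config", "religion_types"),
--     ("religion_config", "devotion_modifiers"),
--     ("religion_config", "compatibility_factors"),
--     ("narrative_templates", "conversion_templates"),
--     ("narrative_templates", "devotion_change_narratives"),
--     ("narrative_templates", "religious_event_templates"),
--     ("influence_rules", "spread_mechanics"),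
--     ("influence_rules", "influence_calculations"),
--     ("influence_rules", "regional_modifiers"),
--     ("practices_templates", "practice_templates"),
--     ("practices_templates", "festival_templates"),
-- ]
--
--
-- def validate_religion_config(configs):
--     errors = {}
--     for key, section in REQUIRED:
--         cfg = configs.get(key, {})
--         if not cfg:
--             errors.setdefault(key, ["Configuration file not loaded"])
--         elif section not in cfg:
--             errors.setdefault(key, []).append(f"Missing {section} section")
--     return errors
-- ===== Notes on version B (the rewrite author's own statement) =====
-- stated objective: alternative
-- what changed: Replaces A's four per-file validation blocks plus a final dict-filtering comprehension with a single flat pass over an 11-element (config_key, required_section) requirement list that inserts an error entry (via setdefault/append) only when a check fails, so no filtering pass and no per-file blocks remain.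
import Mathlib
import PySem

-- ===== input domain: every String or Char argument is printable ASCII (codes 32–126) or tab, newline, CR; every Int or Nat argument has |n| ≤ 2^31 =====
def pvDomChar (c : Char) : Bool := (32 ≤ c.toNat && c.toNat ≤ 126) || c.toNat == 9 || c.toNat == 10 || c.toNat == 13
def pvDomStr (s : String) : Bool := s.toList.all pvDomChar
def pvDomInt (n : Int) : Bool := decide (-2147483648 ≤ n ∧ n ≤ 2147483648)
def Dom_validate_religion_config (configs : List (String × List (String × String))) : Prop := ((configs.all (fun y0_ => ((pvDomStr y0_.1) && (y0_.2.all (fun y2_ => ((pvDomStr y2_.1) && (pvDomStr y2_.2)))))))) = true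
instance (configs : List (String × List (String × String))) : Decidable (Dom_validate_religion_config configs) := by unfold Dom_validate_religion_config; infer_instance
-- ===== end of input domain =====

-- ===== PORT A =====
-- B replaces A's four per-file blocks + final filter with ONE flat pass over (key, section)
-- requirement pairs that inserts error entries on first failure (objective: alternative).
def validate_religion_config (configs : List (String × List (String × String))) : List (String × List String) :=
  -- errors = {"religion_config": [], ...}: the four statically-keyed entries are kept as four bindings
  let e1 : List String := []
  let e2 : List String := []
  let e3 : List String := []
  let e4 : List String := []
  let cd := PySem.Dict.mk configs
  let religion_config := cd.getD "religion_config" []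
  let narrative_templates := cd.getD "narrative_templates" []
  let influence_rules := cd.getD "influence_rules" []
  let practices_templates := cd.getD "practices_templates" []
  let e1 := if religion_config = [] then e1 ++ ["Configuration file not loaded"]
    else
      let e1 := if (PySem.Dict.mk religion_config).contains "religion_types" then e1
                else e1 ++ ["Missing religion_types section"]
      let e1 := if (PySem.Dict.mk religion_config).contains "devotion_modifiers" then e1
                else e1 ++ ["Missing devotion_modifiers section"]
      let e1 := if (PySem.Dict.mk religion_config).contains "compatibility_factors" then e1
                else e1 ++ ["Missing compatibility_factors section"]
      e1
  let e2 := if narrative_templates = [] then e2 ++ ["Configuration file not loaded"]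
    else ["conversion_templates", "devotion_change_narratives", "religious_event_templates"].foldl
      (fun e2 sec => if (PySem.Dict.mk narrative_templates).contains sec then e2
                     else e2 ++ ["Missing " ++ sec ++ " section"]) e2
  let e3 := if influence_rules = [] then e3 ++ ["Configuration file not loaded"]
    else ["spread_mechanics", "influence_calculations", "regional_modifiers"].foldl
      (fun e3 sec => if (PySem.Dict.mk influence_rules).contains sec then e3
                     else e3 ++ ["Missing " ++ sec ++ " section"]) e3
  let e4 := if practices_templates = [] then e4 ++ ["Configuration file not loaded"]
    else ["practice_templates", "festival_templates"].foldl
      (fun e4 sec => if (PySem.Dict.mk practices_templates).contains sec then e4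
                     else e4 ++ ["Missing " ++ sec ++ " section"]) e4
  -- {k: v for k, v in errors.items() if v}: the comprehension as its loop (keys are unique, so
  -- each kept item is appended in order)
  ([("religion_config", e1), ("narrative_templates", e2), ("influence_rules", e3),
    ("practices_templates", e4)]).foldl (fun acc kv => if kv.2 ≠ [] then acc ++ [kv] else acc) []

-- ===== PORT B =====
-- the flat REQUIRED table of Source B: (config key, required section) pairs
def pvRequired : List (String × String) :=
  [("religion_config", "religion_types"),
   ("religion_config", "devotion_modifiers"),
   ("religion_config", "compatibility_factors"),
   ("narrative_templates", "conversion_templates"),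
   ("narrative_templates", "devotion_change_narratives"),
   ("narrative_templates", "religious_event_templates"),
   ("influence_rules", "spread_mechanics"),
   ("influence_rules", "influence_calculations"),
   ("influence_rules", "regional_modifiers"),
   ("practices_templates", "practice_templates"),
   ("practices_templates", "festival_templates")]

-- the body of Source B's single for-loop (errors.setdefault / setdefault(...).append are the
-- PySem.Dict.setdefault / modify primitives)
def pvStep (configs : List (String × List (String × String)))
    (errors : PySem.Dict String (List String)) (ks : String × String) :
    PySem.Dict String (List String) :=
  let cfg := (PySem.Dict.mk configs).getD ks.1 []
  if cfg = [] then errors.setdefault ks.1 ["Configuration file not loaded"]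
  else if (PySem.Dict.mk cfg).contains ks.2 then errors
  else errors.modify ks.1 [] (· ++ ["Missing " ++ ks.2 ++ " section"])

def validate_religion_config_alt (configs : List (String × List (String × String))) : List (String × List String) :=
  (pvRequired.foldl (pvStep configs) PySem.Dict.empty).items

-- ===== PRECONDITION & SPEC =====
def Spec_validate_religion_config (configs : List (String × List (String × String))) (out : List (String × List String)) : Prop := out = validate_religion_config_alt configs
instance (configs : List (String × List (String × String))) (out : List (String × List String)) : Decidable (Spec_validate_religion_config configs out) := by unfold Spec_validate_religion_config; infer_instance

-- ===== CLAIM (what is proved, stated in full; the proofs are below) =====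
def Claim_equal_validate_religion_config : Prop := ∀ (configs : List (String × List (String × String))), Dom_validate_religion_config configs → Spec_validate_religion_config configs (validate_religion_config configs)

-- ===== LEMMAS AND PROOFS =====
-- "the entry (k, v), kept only if v is non-empty"
def pvEntryOf (k : String) (v : List String) : List (String × List String) :=
  if v = [] then [] else [(k, v)]

-- the "Missing … section" messages for the sections of secs absent from cfg
def pvMsgs (cfg : List (String × String)) (secs : List String) : List String :=
  (secs.filter (fun s => !(PySem.Dict.mk cfg).contains s)).map (fun s => "Missing " ++ s ++ " section")

theorem pv_get?_last (k : String) (ms : List String) :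
    ∀ (pre : List (String × List String)), (∀ p ∈ pre, (p.1 == k) = false) →
    (PySem.Dict.mk (pre ++ [(k, ms)])).get? k = some ms := by
  intro pre
  induction pre with
  | nil => intro _; simp [PySem.Dict.get?_mk_cons]
  | cons p t ih =>
    intro h
    rw [List.cons_append, PySem.Dict.get?_mk_cons]
    simp only [h p (by simp)]
    exact ih (fun q hq => h q (by simp [hq]))

theorem pv_contains_of_items (d : PySem.Dict String (List String)) (k : String) :
    d.contains k = d.items.any (fun p => p.1 == k) := rfl

theorem pv_phase2 (configs : List (String × List (String × String))) (cfg : List (String × String))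
    (k : String) (hcfg : (PySem.Dict.mk configs).getD k [] = cfg) (hne : cfg ≠ []) :
    ∀ (t : List String) (pre : List (String × List String)) (ms : List String),
      (∀ p ∈ pre, (p.1 == k) = false) →
      ((t.map (fun s => (k, s))).foldl (pvStep configs) (PySem.Dict.mk (pre ++ [(k, ms)]))).items
        = pre ++ [(k, ms ++ pvMsgs cfg t)] := by
  intro t
  induction t with
  | nil => intro pre ms _; simp [pvMsgs]
  | cons s t ih =>
    intro pre ms h
    rw [List.map_cons, List.foldl_cons]
    by_cases hc : (PySem.Dict.mk cfg).contains s = true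
    · have hstep : pvStep configs (PySem.Dict.mk (pre ++ [(k, ms)])) (k, s)
          = PySem.Dict.mk (pre ++ [(k, ms)]) := by
        simp [pvStep, hcfg, hne, hc]
      have hc' : (cfg.any fun p => p.1 == s) = true := hc
      rw [hstep, ih pre ms h]
      simp [pvMsgs, hc']
    · simp only [Bool.not_eq_true] at hc
      have hstep : pvStep configs (PySem.Dict.mk (pre ++ [(k, ms)])) (k, s)
          = PySem.Dict.mk (pre ++ [(k, ms ++ ["Missing " ++ s ++ " section"])]) := by
        simp only [pvStep, hcfg, if_neg hne, hc, Bool.false_eq_true, if_false]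
        unfold PySem.Dict.modify
        rw [PySem.Dict.getD_eq_get?_getD, pv_get?_last k ms pre h]
        apply PySem.Dict.ext
        rw [PySem.Dict.items_insert_of_contains]
        · show (pre ++ [(k, ms)]).map _ = _
          rw [List.map_append]
          congr 1
          · trans (pre.map id)
            · apply List.map_congr_left; intro p hp; simp [h p hp]
            · simp
          · simp
        · rw [pv_contains_of_items]
          show (pre ++ [(k, ms)]).any _ = true
          simp
      have hc' : (cfg.any fun p => p.1 == s) = false := hc
      rw [hstep, ih _ _ h]
      simp [pvMsgs, hc']

theorem pv_phase1 (configs : List (String × List (String × String))) (cfg : List (String × String))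
    (k : String) (hcfg : (PySem.Dict.mk configs).getD k [] = cfg) (hne : cfg ≠ []) :
    ∀ (secs : List String) (errors : PySem.Dict String (List String)),
      errors.contains k = false →
      ((secs.map (fun s => (k, s))).foldl (pvStep configs) errors).items
        = errors.items ++ pvEntryOf k (pvMsgs cfg secs) := by
  intro secs
  induction secs with
  | nil => intro errors _; simp [pvMsgs, pvEntryOf]
  | cons s t ih =>
    intro errors hk
    rw [List.map_cons, List.foldl_cons]
    by_cases hc : (PySem.Dict.mk cfg).contains s = true
    · have hstep : pvStep configs errors (k, s) = errors := by
        simp [pvStep, hcfg, hne, hc]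
      have hc' : (cfg.any fun p => p.1 == s) = true := hc
      rw [hstep, ih errors hk]
      simp [pvMsgs, hc']
    · simp only [Bool.not_eq_true] at hc
      have hc' : (cfg.any fun p => p.1 == s) = false := hc
      have hget : errors.getD k [] = [] :=
        PySem.Dict.getD_of_not_contains errors [] hk
      have hstep : pvStep configs errors (k, s)
          = PySem.Dict.mk (errors.items ++ [(k, ["Missing " ++ s ++ " section"])]) := by
        simp only [pvStep, hcfg, if_neg hne, hc, Bool.false_eq_true, if_false]
        unfold PySem.Dict.modify PySem.Dict.insert
        rw [hget]
        simp [hk]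
      rw [hstep, pv_phase2 configs cfg k hcfg hne t errors.items _ ?_]
      · simp [pvMsgs, pvEntryOf, hc']
      · intro p hp
        by_contra hb
        simp only [Bool.not_eq_false] at hb
        have : errors.contains k = true := by
          rw [pv_contains_of_items]
          exact List.any_eq_true.mpr ⟨p, hp, hb⟩
        rw [this] at hk; cases hk

theorem pv_skip (configs : List (String × List (String × String))) (k : String)
    (hcfg : (PySem.Dict.mk configs).getD k [] = []) :
    ∀ (t : List String) (d : PySem.Dict String (List String)), d.contains k = true →
      (t.map (fun s => (k, s))).foldl (pvStep configs) d = d := by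
  intro t
  induction t with
  | nil => intro d _; rfl
  | cons s t ih =>
    intro d hd
    rw [List.map_cons, List.foldl_cons]
    have hstep : pvStep configs d (k, s) = d := by
      simp [pvStep, hcfg, PySem.Dict.setdefault, hd]
    rw [hstep]
    exact ih d hd

theorem pv_grp (configs : List (String × List (String × String))) (cfg : List (String × String))
    (k : String) (hcfg : (PySem.Dict.mk configs).getD k [] = cfg)
    (secs : List String) (hsec : secs ≠ [])
    (errors : PySem.Dict String (List String)) (hk : errors.contains k = false) :
    ((secs.map (fun s => (k, s))).foldl (pvStep configs) errors).items
      = errors.items ++ (if cfg = [] then [(k, ["Configuration file not loaded"])]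
                         else pvEntryOf k (pvMsgs cfg secs)) := by
  by_cases hne : cfg = []
  · subst hne
    rw [if_pos rfl]
    cases secs with
    | nil => exact absurd rfl hsec
    | cons s t =>
      rw [List.map_cons, List.foldl_cons]
      have hstep : pvStep configs errors (k, s)
          = PySem.Dict.mk (errors.items ++ [(k, ["Configuration file not loaded"])]) := by
        simp only [pvStep, hcfg]
        unfold PySem.Dict.setdefault
        simp [hk]
      rw [hstep, pv_skip configs k hcfg t _ (by rw [pv_contains_of_items]; simp)]
  · rw [if_neg hne, pv_phase1 configs cfg k hcfg hne secs errors hk]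

theorem pv_block_eq (cfg : List (String × String)) (secs : List String) (acc : List String) :
    secs.foldl (fun e sec => if (PySem.Dict.mk cfg).contains sec then e
                             else e ++ ["Missing " ++ sec ++ " section"]) acc
    = acc ++ pvMsgs cfg secs := by
  induction secs generalizing acc with
  | nil => simp [pvMsgs]
  | cons s t ih =>
    cases h : (PySem.Dict.mk cfg).contains s <;>
      simp only [List.foldl_cons, pvMsgs, List.filter_cons, h, Bool.not_false, Bool.not_true,
        if_true, Bool.false_eq_true, if_false, ih, List.map_cons, List.append_assoc,
        List.cons_append, List.nil_append]

theorem pv_first_eq (cfg : List (String × String)) :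
    (if (PySem.Dict.mk cfg).contains "compatibility_factors" = true then
       (if (PySem.Dict.mk cfg).contains "devotion_modifiers" = true then
          (if (PySem.Dict.mk cfg).contains "religion_types" = true then ([] : List String)
           else ["Missing religion_types section"])
        else (if (PySem.Dict.mk cfg).contains "religion_types" = true then ([] : List String)
              else ["Missing religion_types section"]) ++ ["Missing devotion_modifiers section"])
     else
       ((if (PySem.Dict.mk cfg).contains "devotion_modifiers" = true then
           (if (PySem.Dict.mk cfg).contains "religion_types" = true then ([] : List String)
            else ["Missing religion_types section"])
         else (if (PySem.Dict.mk cfg).contains "religion_types" = true then ([] : List String)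
               else ["Missing religion_types section"]) ++ ["Missing devotion_modifiers section"]) ++
         ["Missing compatibility_factors section"]))
    = pvMsgs cfg ["religion_types", "devotion_modifiers", "compatibility_factors"] := by
  cases h1 : (PySem.Dict.mk cfg).contains "religion_types" <;>
  cases h2 : (PySem.Dict.mk cfg).contains "devotion_modifiers" <;>
  cases h3 : (PySem.Dict.mk cfg).contains "compatibility_factors" <;>
    (simp only [pvMsgs, List.filter_cons, List.filter_nil, h1, h2, h3, Bool.not_false, Bool.not_true,
       if_true, Bool.false_eq_true, if_false, List.map_cons, List.map_nil]
     try rfl)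

theorem pv_entry_push (k : String) (b : Prop) [Decidable b] (m : List String) :
    pvEntryOf k (if b then ["Configuration file not loaded"] else m)
    = if b then [(k, ["Configuration file not loaded"])] else pvEntryOf k m := by
  split <;> simp [pvEntryOf]

theorem pv_keep (acc : List (String × List String)) (k : String) (v : List String) :
    (if v ≠ [] then acc ++ [(k, v)] else acc) = acc ++ pvEntryOf k v := by
  by_cases hv : v = [] <;> simp [hv, pvEntryOf]

theorem pv_any_grp_false (k k' : String) (h : (k == k') = false) (c : Prop) [Decidable c]
    (m : List String) :
    ((if c then [(k, ["Configuration file not loaded"])] else pvEntryOf k m).any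
      (fun p => p.1 == k')) = false := by
  split
  · simp [h]
  · unfold pvEntryOf; split <;> simp [h]

theorem pv_keep0 (k : String) (v : List String) :
    (if v ≠ [] then [(k, v)] else ([] : List (String × List String))) = pvEntryOf k v := by
  by_cases hv : v = [] <;> simp [hv, pvEntryOf]

theorem pv_main (configs : List (String × List (String × String))) :
    validate_religion_config configs = validate_religion_config_alt configs := by
  have hsplit : pvRequired
      = ((["religion_types", "devotion_modifiers", "compatibility_factors"].map
            (fun s => ("religion_config", s)))
        ++ (["conversion_templates", "devotion_change_narratives", "religious_event_templates"].map
            (fun s => ("narrative_templates", s)))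
        ++ (["spread_mechanics", "influence_calculations", "regional_modifiers"].map
            (fun s => ("influence_rules", s)))
        ++ (["practice_templates", "festival_templates"].map
            (fun s => ("practices_templates", s)))) := rfl
  unfold validate_religion_config_alt
  rw [hsplit, List.foldl_append, List.foldl_append, List.foldl_append]
  have h1 := pv_grp configs _ "religion_config" rfl
      ["religion_types", "devotion_modifiers", "compatibility_factors"] (by simp)
      PySem.Dict.empty (by rw [pv_contains_of_items]; rfl)
  have hk2 : ((["religion_types", "devotion_modifiers", "compatibility_factors"].map
        (fun s => ("religion_config", s))).foldl (pvStep configs)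
        PySem.Dict.empty).contains "narrative_templates" = false := by
    rw [pv_contains_of_items, h1]
    simp only [List.any_append]
    rw [pv_any_grp_false _ _ (by decide)]
    rfl
  have h2 := pv_grp configs _ "narrative_templates" rfl
      ["conversion_templates", "devotion_change_narratives", "religious_event_templates"] (by simp)
      _ hk2
  have hk3 : ((["conversion_templates", "devotion_change_narratives", "religious_event_templates"].map
        (fun s => ("narrative_templates", s))).foldl (pvStep configs)
        ((["religion_types", "devotion_modifiers", "compatibility_factors"].map
          (fun s => ("religion_config", s))).foldl (pvStep configs)
          PySem.Dict.empty)).contains "influence_rules" = false := by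
    rw [pv_contains_of_items, h2, h1]
    simp only [List.any_append]
    rw [pv_any_grp_false _ _ (by decide), pv_any_grp_false _ _ (by decide)]
    rfl
  have h3 := pv_grp configs _ "influence_rules" rfl
      ["spread_mechanics", "influence_calculations", "regional_modifiers"] (by simp)
      _ hk3
  have hk4 : ((["spread_mechanics", "influence_calculations", "regional_modifiers"].map
        (fun s => ("influence_rules", s))).foldl (pvStep configs)
        ((["conversion_templates", "devotion_change_narratives", "religious_event_templates"].map
          (fun s => ("narrative_templates", s))).foldl (pvStep configs)
          ((["religion_types", "devotion_modifiers", "compatibility_factors"].map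
            (fun s => ("religion_config", s))).foldl (pvStep configs)
            PySem.Dict.empty))).contains "practices_templates" = false := by
    rw [pv_contains_of_items, h3, h2, h1]
    simp only [List.any_append]
    rw [pv_any_grp_false _ _ (by decide), pv_any_grp_false _ _ (by decide),
        pv_any_grp_false _ _ (by decide)]
    rfl
  have h4 := pv_grp configs _ "practices_templates" rfl
      ["practice_templates", "festival_templates"] (by simp)
      _ hk4
  rw [h4, h3, h2, h1]
  -- A side
  simp only [validate_religion_config]
  rw [pv_block_eq, pv_block_eq, pv_block_eq]
  simp only [List.foldl_cons, List.foldl_nil, List.nil_append]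
  rw [pv_first_eq]
  rw [pv_keep, pv_keep, pv_keep, pv_keep0]
  rw [pv_entry_push, pv_entry_push, pv_entry_push, pv_entry_push]
  simp [List.append_assoc, PySem.Dict.empty]

-- ===== VERDICT (by name: the statement is the Claim_ definition above) =====
theorem validate_religion_config_spec : Claim_equal_validate_religion_config := by
  intro configs _
  unfold Spec_validate_religion_config
  exact pv_main configs
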